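-- pv_equiv track=rewrite | github.com/m1stermanager/aoc-2022-python | day6.py | part1
-- ===== SOURCE A (Python) =====
-- from typing import List
--
-- def part1(lines: List[str]) -> int:
--     ans = 0
--     line = lines[0]
--     for i in range(0, len(line)):
--         chunk = line[i:i+4]
--         if len(set(chunk)) == 4:
--             ans = i+4
--             break
--
--     return ans
-- ===== SOURCE B (Python) =====
-- from typing import List
--
-- def part1(lines: List[str]) -> int:
--     line = lines[0]
--     last = {}
--     start = 0
--     for j, ch in enumerate(line):
--         prev = last.get(ch, -1)
--         if prev >= start:
--             start = prev + 1
--         last[ch] = j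
--         if j - start >= 3:
--             return j + 1
--     return 0
-- ===== Notes on version B (the rewrite author's own statement) =====
-- stated objective: alternative
-- what changed: B replaces A's per-position rebuild of a set from each 4-char slice with a single last-occurrence-skip pass: a dict of each character's last index and a running window start that jumps past repeats, returning once the duplicate-free window reaches length 4.
import Mathlib
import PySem

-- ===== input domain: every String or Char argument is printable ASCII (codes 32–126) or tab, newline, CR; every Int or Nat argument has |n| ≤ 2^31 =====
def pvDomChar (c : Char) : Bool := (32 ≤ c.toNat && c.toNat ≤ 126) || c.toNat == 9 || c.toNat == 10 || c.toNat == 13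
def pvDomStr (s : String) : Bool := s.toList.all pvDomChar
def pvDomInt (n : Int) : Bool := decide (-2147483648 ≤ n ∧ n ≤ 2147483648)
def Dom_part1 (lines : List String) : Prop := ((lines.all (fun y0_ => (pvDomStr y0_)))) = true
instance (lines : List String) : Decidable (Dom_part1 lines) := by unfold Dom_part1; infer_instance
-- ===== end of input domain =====

-- B replaces A's rescan of every 4-char slice with a single last-occurrence/window-start skip pass (alternative algorithm, same O(n) cost here).

-- ===== PORT A =====
-- for i in range(0, len(line)): chunk = line[i:i+4]; if len(set(chunk)) == 4: ans = i+4; break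
def part1Loop (cs : List Char) (i : Nat) : Int :=
  if _h : i < cs.length then
    if PySem.Set.len (PySem.Set.ofList (PySem.List.slice cs (some (i : Int)) (some ((i : Int) + 4)))) = 4
    then (i : Int) + 4
    else part1Loop cs (i + 1)
  else 0
termination_by cs.length - i

def part1 (lines : List String) : Int :=
  match PySem.List.pyGet? lines 0 with
  | none => 0            -- IndexError in Python; excluded by Pre_part1
  | some line => part1Loop line.toList 0

-- ===== PORT B =====
-- for j, ch in enumerate(line): prev = last.get(ch, -1); if prev >= start: start = prev+1;
--   last[ch] = j; if j - start >= 3: return j+1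
def part1AltLoop : List Char → Nat → Int → PySem.Dict Char Int → Int
  | [], _, _, _ => 0
  | ch :: rest, j, start, last =>
    let prev := last.getD ch (-1)
    let start' := if prev ≥ start then prev + 1 else start
    let last' := last.insert ch (j : Int)
    if (j : Int) - start' ≥ 3 then (j : Int) + 1
    else part1AltLoop rest (j + 1) start' last'

def part1_alt (lines : List String) : Int :=
  match PySem.List.pyGet? lines 0 with
  | none => 0            -- IndexError in Python; excluded by Pre_part1
  | some line => part1AltLoop line.toList 0 0 PySem.Dict.empty

-- ===== PRECONDITION & SPEC =====
-- Pre_ excludes only the empty list, on which A raises IndexError (lines[0]).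
def Pre_part1 (lines : List String) : Prop := lines ≠ []
instance (lines : List String) : Decidable (Pre_part1 lines) := by unfold Pre_part1; infer_instance
def pvWitness_part1 : List String := (["mjqjpqmgbljsphdztnvjfqwrcgsmlb"])

def Spec_part1 (lines : List String) (out : Int) : Prop := out = part1_alt lines
instance (lines : List String) (out : Int) : Decidable (Spec_part1 lines out) := by unfold Spec_part1; infer_instance

-- ===== CLAIM (what is proved, stated in full; the proofs are below) =====
def Claim_equal_part1 : Prop := ∀ (lines : List String), Dom_part1 lines → Pre_part1 lines → Spec_part1 lines (part1 lines)

-- ===== LEMMAS AND PROOFS =====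

-- the segment cs[s:j] of already-read characters
def seg (cs : List Char) (s j : Nat) : List Char := (cs.drop s).take (j - s)

-- index of the last occurrence of c among cs[0:j], or -1 (what B's dict holds)
def lastOcc (cs : List Char) : Nat → Char → Int
  | 0, _ => -1
  | j+1, c => if cs[j]? = some c then (j : Int) else lastOcc cs j c

-- loop invariant of B: start is the least s with cs[s:j] duplicate-free, last = last occurrences
def BInv (cs : List Char) (j : Nat) (start : Int) (last : PySem.Dict Char Int) : Prop :=
  0 ≤ start ∧ start ≤ (j : Int) ∧
  (seg cs start.toNat j).Nodup ∧
  (∀ s : Nat, (s : Int) < start → ¬ (seg cs s j).Nodup) ∧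
  (∀ c, last.getD c (-1) = lastOcc cs j c)

theorem lastOcc_lt (cs : List Char) (j : Nat) (c : Char) : lastOcc cs j c < (j : Int) := by
  induction j with
  | zero => simp [lastOcc]
  | succ j ih =>
    simp only [lastOcc]
    split_ifs
    · push_cast; omega
    · push_cast; omega

theorem lastOcc_get (cs : List Char) (j : Nat) (c : Char) (h : 0 ≤ lastOcc cs j c) :
    cs[(lastOcc cs j c).toNat]? = some c := by
  induction j with
  | zero => simp [lastOcc] at h
  | succ j ih =>
    by_cases hc : cs[j]? = some c
    · simp only [lastOcc, if_pos hc, Int.toNat_natCast]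
      exact hc
    · simp only [lastOcc, if_neg hc] at h ⊢
      exact ih h

theorem lastOcc_not_after (cs : List Char) (j : Nat) (c : Char) (m : Nat)
    (h1 : lastOcc cs j c < (m : Int)) (h2 : m < j) : cs[m]? ≠ some c := by
  induction j with
  | zero => omega
  | succ j ih =>
    simp only [lastOcc] at h1
    by_cases hc : cs[j]? = some c
    · rw [if_pos hc] at h1
      exfalso; omega
    · rw [if_neg hc] at h1
      rcases Nat.lt_succ_iff_lt_or_eq.mp h2 with hm | hm
      · exact ih h1 hm
      · subst hm; exact hc

theorem seg_getElem? (cs : List Char) (s j t : Nat) (ht : t < (seg cs s j).length) :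
    (seg cs s j)[t]? = cs[s + t]? := by
  unfold seg at *
  rw [List.length_take] at ht
  rw [List.getElem?_take_of_lt (by omega), List.getElem?_drop]

theorem seg_length_le (cs : List Char) (s j : Nat) : (seg cs s j).length ≤ j - s := by
  simpa [seg] using List.length_take_le _ _

theorem seg_succ (cs : List Char) (s j : Nat) (hj : j < cs.length) (hs : s ≤ j) :
    seg cs s (j + 1) = seg cs s j ++ (cs[j]?).toList := by
  unfold seg
  have h1 : j + 1 - s = (j - s) + 1 := by omega
  have h2 : s + (j - s) = j := by omega
  rw [h1, List.take_succ, List.getElem?_drop, h2]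

theorem seg_drop (cs : List Char) (s d j : Nat) :
    seg cs (s + d) j = (seg cs s j).drop d := by
  unfold seg
  rw [List.drop_take, List.drop_drop]
  have h1 : j - s - d = j - (s + d) := by omega
  have h2 : s + d = d + s := Nat.add_comm s d
  rw [h1, h2]

theorem dup_not_nodup (l : List Char) (t1 t2 : Nat) (c : Char) (hne : t1 < t2)
    (hlen : t2 < l.length) (h1 : l[t1]? = some c) (h2 : l[t2]? = some c) : ¬ l.Nodup := by
  intro hn
  exact (List.nodup_iff_getElem?_ne_getElem?.mp hn t1 t2 hne hlen) (h1.trans h2.symm)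

theorem mem_seg_exists (cs : List Char) (s j : Nat) (c : Char) (h : c ∈ seg cs s j) :
    ∃ m : Nat, s ≤ m ∧ m < j ∧ cs[m]? = some c := by
  obtain ⟨t, ht, he⟩ := List.getElem_of_mem h
  have h? : (seg cs s j)[t]? = some c := by rw [List.getElem?_eq_getElem ht, he]
  rw [seg_getElem? cs s j t ht] at h?
  refine ⟨s + t, by omega, ?_, h?⟩
  have := seg_length_le cs s j
  omega

-- len(set([a,b,c,d])) == 4 iff the four characters are pairwise distinct
theorem set4_len (a b c d : Char) :
    (PySem.Set.len (PySem.Set.ofList [a,b,c,d]) = 4) ↔ (a ≠ b ∧ a ≠ c ∧ a ≠ d ∧ b ≠ c ∧ b ≠ d ∧ c ≠ d) := by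
  simp [PySem.Set.ofList, PySem.Set.add, PySem.Set.len, List.foldl, PySem.Set.contains]
  split_ifs <;> simp_all <;> try tauto

theorem set4_nodup (a b c d : Char) :
    (PySem.Set.len (PySem.Set.ofList [a,b,c,d]) = 4) ↔ ([a,b,c,d] : List Char).Nodup := by
  rw [set4_len]
  simp only [List.nodup_cons, List.mem_cons, List.not_mem_nil, List.mem_singleton,
    List.nodup_nil, or_false, and_true]
  tauto

theorem add_len_le (s : List Char) (x : Char) :
    (PySem.Set.add s x).length ≤ s.length + 1 := by
  simp [PySem.Set.add]; split_ifs <;> simp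

theorem ofList_foldl_len_le (xs s : List Char) :
    (List.foldl PySem.Set.add s xs).length ≤ s.length + xs.length := by
  induction xs generalizing s with
  | nil => simp
  | cons x xs ih =>
    have h1 := ih (PySem.Set.add s x)
    have h2 := add_len_le s x
    simp only [List.foldl, List.length_cons]
    omega

theorem setlen_short (xs : List Char) (h : xs.length < 4) :
    PySem.Set.len (PySem.Set.ofList xs) ≠ 4 := by
  intro hc
  have hb := ofList_foldl_len_le xs []
  rw [PySem.Set.ofList_eq_foldl] at hc
  simp only [PySem.Set.len, List.length_nil, Nat.zero_add] at hc hb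
  omega

-- A's loop returns 0 once no full 4-char window remains
theorem part1Loop_short (cs : List Char) (i : Nat) (h : cs.length < i + 4) :
    part1Loop cs i = 0 := by
  by_cases hi : i < cs.length
  · have hw : (PySem.List.slice cs (some (i : Int)) (some ((i : Int) + 4))).length < 4 := by
      have h4 : ((i : Int) + 4) = ((i : Int) + ((4 : Nat) : Int)) := by norm_num
      rw [h4, PySem.List.slice_natCast_add, List.length_take, List.length_drop]
      omega
    rw [part1Loop, dif_pos hi, if_neg (setlen_short _ hw)]
    exact part1Loop_short cs (i + 1) (by omega)
  · rw [part1Loop, dif_neg hi]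
termination_by cs.length - i
decreasing_by omega

-- the 4-char window of A at start index i equals seg cs i (i+4)
theorem slice_eq_seg (cs : List Char) (i : Nat) :
    PySem.List.slice cs (some (i : Int)) (some ((i : Int) + 4)) = seg cs i (i + 4) := by
  have h4 : ((i : Int) + 4) = ((i : Int) + ((4 : Nat) : Int)) := by norm_num
  rw [h4, PySem.List.slice_natCast_add]
  unfold seg
  congr 1
  omega

-- main lemma: from any invariant state, B's loop computes what A's loop computes from j-3
theorem altLoop_eq (cs : List Char) (j : Nat) (start : Int) (last : PySem.Dict Char Int)
    (hinv : BInv cs j start last) :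
    part1AltLoop (cs.drop j) j start last = part1Loop cs (j - 3) := by
  obtain ⟨h0, hsj, hnd, hmin, hdict⟩ := hinv
  match hx : cs.drop j with
  | [] =>
    have hlen : cs.length ≤ j := by
      by_contra hc
      rw [List.drop_eq_nil_iff] at hx
      omega
    rw [part1AltLoop, part1Loop_short cs (j - 3) (by omega)]
  | ch :: rest =>
    have hjlen : j < cs.length := by
      by_contra hc
      rw [List.drop_eq_nil_of_le (by omega)] at hx
      simp at hx
    have hchj : cs[j]? = some ch := by
      have : (cs.drop j)[0]? = some ch := by rw [hx]; rfl
      rwa [List.getElem?_drop, Nat.add_zero] at this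
    have hrest : cs.drop (j + 1) = rest := by
      have h := congrArg (List.drop 1) hx
      rw [List.drop_drop] at h
      simpa using h
    rw [part1AltLoop]
    simp only [hdict ch]
    set prev := lastOcc cs j ch with hprev
    set start' := if prev ≥ start then prev + 1 else start with hstart'
    have hprevlt : prev < (j : Int) := lastOcc_lt cs j ch
    have h0' : 0 ≤ start' := by rw [hstart']; split_ifs with hb <;> omega
    have hsj' : start' ≤ ((j : Nat) : Int) + 1 := by rw [hstart']; split_ifs with hb <;> omega
    -- new segment is duplicate-free
    have hnd' : (seg cs start'.toNat (j + 1)).Nodup := by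
      have hfront : (seg cs start'.toNat j).Nodup := by
        rw [hstart']
        split_ifs with hb
        · have he : (prev + 1).toNat = start.toNat + ((prev + 1).toNat - start.toNat) := by omega
          rw [if_pos hb] at hstart'
          rw [he, seg_drop]
          exact hnd.sublist (List.drop_sublist _ _)
        · exact hnd
      have hnotin : ch ∉ seg cs start'.toNat j := by
        intro hmem
        obtain ⟨m, hm1, hm2, hm3⟩ := mem_seg_exists cs start'.toNat j ch hmem
        have hlt : prev < (m : Int) := by
          rw [hstart'] at hm1
          split_ifs at hm1 with hb <;> omega
        exact lastOcc_not_after cs j ch m hlt hm2 hm3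
      rw [seg_succ cs start'.toNat j hjlen (by omega), hchj]
      simp only [Option.toList_some]
      simp [List.nodup_append, hfront]
      intro a ha he
      exact hnotin (he ▸ ha)
    -- minimality of the new start
    have hmin' : ∀ s : Nat, (s : Int) < start' → ¬ (seg cs s (j + 1)).Nodup := by
      intro s hs hnod
      have hsle : s ≤ j := by omega
      by_cases hss : (s : Int) < start
      · refine hmin s hss ?_
        have := seg_succ cs s j hjlen hsle
        rw [this, hchj] at hnod
        exact hnod.sublist (List.sublist_append_left _ _)
      · -- start ≤ s < start' = prev + 1, so cs[prev] = cs[j] = ch both lie in cs[s:j+1]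
        have hb : prev ≥ start := by
          rw [hstart'] at hs
          split_ifs at hs with hb
          · exact hb
          · omega
        have hsprev : (s : Int) ≤ prev := by
          rw [hstart', if_pos hb] at hs
          omega
        have hprev0 : 0 ≤ prev := by omega
        have hget : cs[prev.toNat]? = some ch := lastOcc_get cs j ch hprev0
        have hlen1 : (seg cs s (j + 1)).length = min (j + 1 - s) (cs.length - s) := by
          simp [seg, List.length_take, List.length_drop]
        have ht2 : j - s < (seg cs s (j + 1)).length := by omega
        have h1 : (seg cs s (j + 1))[prev.toNat - s]? = some ch := by
          rw [seg_getElem? cs s (j + 1) _ (by omega)]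
          have : s + (prev.toNat - s) = prev.toNat := by omega
          rw [this]; exact hget
        have h2 : (seg cs s (j + 1))[j - s]? = some ch := by
          rw [seg_getElem? cs s (j + 1) _ ht2]
          have : s + (j - s) = j := by omega
          rw [this]; exact hchj
        exact dup_not_nodup _ (prev.toNat - s) (j - s) ch (by omega) ht2 h1 h2 hnod
    by_cases hret : (j : Int) - start' ≥ 3
    · rw [if_pos hret]
      -- A's window starting at j-3 is exactly cs[j-3 : j+1], duplicate-free by the invariant
      have hj3 : 3 ≤ j := by omega
      have hi : j - 3 < cs.length := by omega
      have hseg : seg cs (j - 3) ((j - 3) + 4) = seg cs (j - 3) (j + 1) := by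
        congr 1; omega
      have hsle : start'.toNat ≤ j - 3 := by omega
      have hwnd : (seg cs (j - 3) (j + 1)).Nodup := by
        have he : j - 3 = start'.toNat + ((j - 3) - start'.toNat) := by omega
        rw [he, seg_drop]
        exact hnd'.sublist (List.drop_sublist _ _)
      have hwlen : (seg cs (j - 3) (j + 1)).length = 4 := by
        simp only [seg, List.length_take, List.length_drop]
        omega
      rw [part1Loop, dif_pos hi, slice_eq_seg, hseg]
      match hw : seg cs (j - 3) (j + 1), hwlen with
      | [a, b, c, d], _ =>
        rw [hw] at hwnd
        rw [if_pos ((set4_nodup a b c d).mpr hwnd)]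
        push_cast
        omega
    · rw [if_neg hret, ← hrest,
        altLoop_eq cs (j + 1) start' (last.insert ch (j : Int))
          ⟨h0', by push_cast; exact_mod_cast hsj', hnd', hmin', ?_⟩]
      · -- part1Loop cs (j-3) = part1Loop cs (j+1-3)
        by_cases hj3 : 3 ≤ j
        · have hstep : j + 1 - 3 = (j - 3) + 1 := by omega
          rw [hstep]
          conv_rhs => rw [part1Loop]
          rw [dif_pos (by omega : j - 3 < cs.length), slice_eq_seg]
          have hseg : seg cs (j - 3) ((j - 3) + 4) = seg cs (j - 3) (j + 1) := by
            congr 1; omega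
          rw [hseg]
          have hnotnod : ¬ (seg cs (j - 3) (j + 1)).Nodup := by
            apply hmin'
            omega
          have hwlen : (seg cs (j - 3) (j + 1)).length = 4 := by
            simp only [seg, List.length_take, List.length_drop]
            omega
          match hw : seg cs (j - 3) (j + 1), hwlen with
          | [a, b, c, d], _ =>
            rw [hw] at hnotnod
            rw [if_neg (fun hl => hnotnod ((set4_nodup a b c d).mp hl))]
        · have : j - 3 = 0 := by omega
          have h2 : j + 1 - 3 = 0 := by omega
          rw [this, h2]
      · -- the dict after insertion holds the last occurrences up to j+1
        intro c
        rw [PySem.Dict.getD_insert]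
        simp only [lastOcc, hchj]
        split_ifs with he1 he2 he2
        · rfl
        · exact absurd (he1 ▸ rfl) he2
        · exact absurd (Option.some.inj he2).symm he1
        · exact hdict c
termination_by cs.length - j
decreasing_by omega

-- ===== VERDICT (by name: the statement is the Claim_ definition above) =====
theorem part1_spec : Claim_equal_part1 := by
  intro lines _ _
  unfold Spec_part1 part1 part1_alt
  cases PySem.List.pyGet? lines 0 with
  | none => rfl
  | some line =>
    have hinv : BInv line.toList 0 0 PySem.Dict.empty := by
      refine ⟨le_refl 0, le_refl 0, by simp [seg], fun s hs => absurd hs (by omega), fun c => ?_⟩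
      simp [PySem.Dict.getD_empty, lastOcc]
    simpa using (altLoop_eq line.toList 0 0 PySem.Dict.empty hinv).symm
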